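-- pv_equiv track=rewrite | github.com/virgiiim/RedditData_Handler | src/textstatistics_generator.py | _Lancaster_Sensorimotor_lexicon
-- ===== SOURCE A (Python) =====
-- def _Lancaster_Sensorimotor_lexicon(tokenized_text, LNA_lexicon, LNP_lexicon):
--     LNP = {'Visual': 0, 'Olfactory': 0, 'Haptic': 0, 'Auditory': 0, 'Interoceptive': 0, 'Gustatory': 0}
--     LNA = {'Hand_arm': 0, 'Mouth': 0, 'Head': 0, 'Torso': 0, 'Foot_leg': 0}
--     for word in tokenized_text:
--         if word in list(LNP_lexicon.keys()):
--             LNP[LNP_lexicon[word]] += 1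
--         if word in list(LNA_lexicon.keys()):
--             LNA[LNA_lexicon[word]] += 1
--     return LNA, LNP
-- ===== SOURCE B (Python) =====
-- def _Lancaster_Sensorimotor_lexicon(tokenized_text, LNA_lexicon, LNP_lexicon):
--     LNP = {c: sum(1 for w in tokenized_text if LNP_lexicon.get(w) == c)
--            for c in ('Visual', 'Olfactory', 'Haptic', 'Auditory', 'Interoceptive', 'Gustatory')}
--     LNA = {c: sum(1 for w in tokenized_text if LNA_lexicon.get(w) == c)
--            for c in ('Hand_arm', 'Mouth', 'Head', 'Torso', 'Foot_leg')}
--     return LNA, LNP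
-- ===== Notes on version B (the rewrite author's own statement) =====
-- stated objective: alternative
-- what changed: B builds each result dict directly by a per-category comprehension that counts tokens whose lexicon.get value equals that category, with no mutable counter dict and no per-token scan of list(lexicon.keys()); A instead mutates two counter dicts token by token while linearly scanning a rebuilt key list for every token.
import Mathlib
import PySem

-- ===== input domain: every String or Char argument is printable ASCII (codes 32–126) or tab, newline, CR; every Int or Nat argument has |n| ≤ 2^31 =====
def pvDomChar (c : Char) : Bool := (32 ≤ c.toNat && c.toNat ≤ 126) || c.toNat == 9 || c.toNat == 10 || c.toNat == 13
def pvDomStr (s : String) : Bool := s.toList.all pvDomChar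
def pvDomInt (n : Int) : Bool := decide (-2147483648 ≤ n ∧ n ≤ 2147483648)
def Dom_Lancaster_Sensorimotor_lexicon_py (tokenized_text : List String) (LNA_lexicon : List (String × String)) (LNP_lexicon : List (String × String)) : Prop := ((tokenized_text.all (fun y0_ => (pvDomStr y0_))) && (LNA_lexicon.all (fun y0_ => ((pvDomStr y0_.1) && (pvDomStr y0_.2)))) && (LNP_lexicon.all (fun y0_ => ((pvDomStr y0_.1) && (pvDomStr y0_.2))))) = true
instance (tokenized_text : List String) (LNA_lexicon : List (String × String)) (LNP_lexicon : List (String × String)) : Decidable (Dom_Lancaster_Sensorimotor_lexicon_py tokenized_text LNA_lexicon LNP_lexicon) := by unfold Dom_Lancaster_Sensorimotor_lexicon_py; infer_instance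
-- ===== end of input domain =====

-- B builds each result dict directly by a per-category count of tokens whose lexicon.get value is that
-- category, instead of A's per-token loop mutating two counter dicts (objective: alternative).

-- shared helper: the two fixed counter dicts A starts from
def pvLNP0 : PySem.Dict String Int :=
  PySem.Dict.ofList [("Visual", 0), ("Olfactory", 0), ("Haptic", 0), ("Auditory", 0), ("Interoceptive", 0), ("Gustatory", 0)]
def pvLNA0 : PySem.Dict String Int :=
  PySem.Dict.ofList [("Hand_arm", 0), ("Mouth", 0), ("Head", 0), ("Torso", 0), ("Foot_leg", 0)]

-- ===== PORT A =====
def Lancaster_Sensorimotor_lexicon_py (tokenized_text : List String) (LNA_lexicon : List (String × String)) (LNP_lexicon : List (String × String)) : (List (String × Int)) × (List (String × Int)) :=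
  let LNAd := PySem.Dict.ofList LNA_lexicon
  let LNPd := PySem.Dict.ofList LNP_lexicon
  let res := tokenized_text.foldl (fun s word =>
      (if LNAd.contains word then s.1.modify (LNAd.getD word "") 0 (· + 1) else s.1,
       if LNPd.contains word then s.2.modify (LNPd.getD word "") 0 (· + 1) else s.2))
    (pvLNA0, pvLNP0)
  (res.1.items, res.2.items)

-- ===== PORT B =====
def Lancaster_Sensorimotor_lexicon_py_alt (tokenized_text : List String) (LNA_lexicon : List (String × String)) (LNP_lexicon : List (String × String)) : (List (String × Int)) × (List (String × Int)) :=
  let LNPd := PySem.Dict.ofList LNP_lexicon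
  let LNAd := PySem.Dict.ofList LNA_lexicon
  let LNP := ["Visual", "Olfactory", "Haptic", "Auditory", "Interoceptive", "Gustatory"].map
      (fun c => (c, (tokenized_text.countP (fun w => LNPd.get? w == some c) : Int)))
  let LNA := ["Hand_arm", "Mouth", "Head", "Torso", "Foot_leg"].map
      (fun c => (c, (tokenized_text.countP (fun w => LNAd.get? w == some c) : Int)))
  (LNA, LNP)

-- ===== PRECONDITION & SPEC =====
-- Pre_ excludes exactly the inputs on which A raises KeyError: a token that is a lexicon key whose
-- category value is not one of the fixed counter keys.
def Pre_Lancaster_Sensorimotor_lexicon_py (tokenized_text : List String) (LNA_lexicon : List (String × String)) (LNP_lexicon : List (String × String)) : Prop :=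
  ∀ w ∈ tokenized_text,
    ((PySem.Dict.ofList LNA_lexicon).contains w = true → (PySem.Dict.ofList LNA_lexicon).getD w "" ∈ pvLNA0.keys) ∧
    ((PySem.Dict.ofList LNP_lexicon).contains w = true → (PySem.Dict.ofList LNP_lexicon).getD w "" ∈ pvLNP0.keys)
instance (tokenized_text : List String) (LNA_lexicon : List (String × String)) (LNP_lexicon : List (String × String)) : Decidable (Pre_Lancaster_Sensorimotor_lexicon_py tokenized_text LNA_lexicon LNP_lexicon) := by unfold Pre_Lancaster_Sensorimotor_lexicon_py; infer_instance

def pvWitness_Lancaster_Sensorimotor_lexicon_py : List String × (List (String × String)) × (List (String × String)) :=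
  (["cat", "cat", "dog"], [("cat", "Mouth")], [("dog", "Visual")])

def Spec_Lancaster_Sensorimotor_lexicon_py (tokenized_text : List String) (LNA_lexicon : List (String × String)) (LNP_lexicon : List (String × String)) (out : (List (String × Int)) × (List (String × Int))) : Prop := out = Lancaster_Sensorimotor_lexicon_py_alt tokenized_text LNA_lexicon LNP_lexicon
instance (tokenized_text : List String) (LNA_lexicon : List (String × String)) (LNP_lexicon : List (String × String)) (out : (List (String × Int)) × (List (String × Int))) : Decidable (Spec_Lancaster_Sensorimotor_lexicon_py tokenized_text LNA_lexicon LNP_lexicon out) := by unfold Spec_Lancaster_Sensorimotor_lexicon_py; infer_instance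

-- ===== CLAIM =====
def Claim_equal_Lancaster_Sensorimotor_lexicon_py : Prop := ∀ (tokenized_text : List String) (LNA_lexicon : List (String × String)) (LNP_lexicon : List (String × String)), Dom_Lancaster_Sensorimotor_lexicon_py tokenized_text LNA_lexicon LNP_lexicon → Pre_Lancaster_Sensorimotor_lexicon_py tokenized_text LNA_lexicon LNP_lexicon → Spec_Lancaster_Sensorimotor_lexicon_py tokenized_text LNA_lexicon LNP_lexicon (Lancaster_Sensorimotor_lexicon_py tokenized_text LNA_lexicon LNP_lexicon)

-- ===== LEMMAS AND PROOFS =====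

theorem pvFoldA_getD (g : String → Bool) (k : String → String) (l : List String) (d : PySem.Dict String Int) (c : String) :
    (l.foldl (fun d w => if g w then d.modify (k w) 0 (· + 1) else d) d).getD c 0
      = d.getD c 0 + (l.countP (fun w => g w && k w == c) : Int) := by
  induction l generalizing d with
  | nil => simp
  | cons w l ih =>
    simp only [List.foldl_cons, List.countP_cons, ih]
    by_cases hg : g w = true
    · simp only [hg, if_true, PySem.Dict.getD_modify, Bool.true_and]
      by_cases hc : c = k w
      · subst hc; simp; ring
      · have : (k w == c) = false := by simp [Ne.symm hc]
        simp [hc, this]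
    · simp [hg]

theorem pvFoldA_keys (g : String → Bool) (k : String → String) (l : List String) (d : PySem.Dict String Int)
    (h : ∀ w ∈ l, g w = true → k w ∈ d.keys) :
    (l.foldl (fun d w => if g w then d.modify (k w) 0 (· + 1) else d) d).keys = d.keys := by
  induction l generalizing d with
  | nil => simp
  | cons w l ih =>
    simp only [List.foldl_cons]
    by_cases hg : g w = true
    · have hk : (d.modify (k w) 0 (· + 1)).keys = d.keys := by
        rw [PySem.Dict.keys_modify, PySem.Dict.keys_insert_of_contains]
        exact (PySem.Dict.contains_iff_mem_keys _ _).mpr (h w (by simp) hg)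
      rw [if_pos hg, ih _ (by intro w' hw' hg'; rw [hk]; exact h w' (by simp [hw']) hg'), hk]
    · rw [if_neg (by simp [hg]), ih _ (fun w' hw' hg' => h w' (by simp [hw']) hg')]

-- the per-token guard-and-lookup of A equals B's single get?-comparison, pointwise
theorem pvPredEq (ld : PySem.Dict String String) (c w : String) :
    (ld.contains w && (ld.getD w "" == c)) = (ld.get? w == some c) := by
  rw [PySem.Dict.contains_eq_isSome_get?, PySem.Dict.getD_eq_get?_getD]
  cases h : ld.get? w <;> simp

-- one component: A's mutating fold, read back as items, is B's per-category count map
theorem pvComponent (ld : PySem.Dict String String) (t : List String) (d0 : PySem.Dict String Int)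
    (hnd : d0.keys.Nodup) (hz : ∀ c, d0.getD c 0 = 0)
    (h : ∀ w ∈ t, ld.contains w = true → ld.getD w "" ∈ d0.keys) :
    (t.foldl (fun d w => if ld.contains w then d.modify (ld.getD w "") 0 (· + 1) else d) d0).items
      = d0.keys.map (fun c => (c, (t.countP (fun w => ld.get? w == some c) : Int))) := by
  have hk := pvFoldA_keys (fun w => ld.contains w) (fun w => ld.getD w "") t d0 h
  rw [PySem.Dict.items_eq_map_keys _ (by rw [hk]; exact hnd) 0, hk]
  apply List.map_congr_left
  intro c _
  rw [pvFoldA_getD, hz, zero_add]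
  congr 2
  apply List.countP_congr
  intro w _
  rw [pvPredEq]

theorem pvZeroA : ∀ c, pvLNA0.getD c 0 = 0 := by
  intro c
  rw [PySem.Dict.getD_eq_get?_getD]
  show ((PySem.Dict.mk [("Hand_arm", 0), ("Mouth", 0), ("Head", 0), ("Torso", 0), ("Foot_leg", 0)]).get? c).getD 0 = 0
  simp only [PySem.Dict.get?_mk_cons]
  split_ifs <;> rfl

theorem pvZeroP : ∀ c, pvLNP0.getD c 0 = 0 := by
  intro c
  rw [PySem.Dict.getD_eq_get?_getD]
  show ((PySem.Dict.mk [("Visual", 0), ("Olfactory", 0), ("Haptic", 0), ("Auditory", 0), ("Interoceptive", 0), ("Gustatory", 0)]).get? c).getD 0 = 0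
  simp only [PySem.Dict.get?_mk_cons]
  split_ifs <;> rfl

-- ===== VERDICT =====
theorem Lancaster_Sensorimotor_lexicon_py_spec : Claim_equal_Lancaster_Sensorimotor_lexicon_py := by
  intro t lna lnp _ hpre
  unfold Spec_Lancaster_Sensorimotor_lexicon_py
  simp only [Lancaster_Sensorimotor_lexicon_py, Lancaster_Sensorimotor_lexicon_py_alt]
  rw [PySem.List.foldl_prod_mk
        (fun d w => if (PySem.Dict.ofList lna).contains w then d.modify ((PySem.Dict.ofList lna).getD w "") 0 (· + 1) else d)
        (fun d w => if (PySem.Dict.ofList lnp).contains w then d.modify ((PySem.Dict.ofList lnp).getD w "") 0 (· + 1) else d)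
        t pvLNA0 pvLNP0]
  refine Prod.ext ?_ ?_
  · rw [pvComponent _ t pvLNA0 (by decide) pvZeroA (fun w hw hg => (hpre w hw).1 hg)]; rfl
  · rw [pvComponent _ t pvLNP0 (by decide) pvZeroP (fun w hw hg => (hpre w hw).2 hg)]; rfl
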